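-- pv_equiv track=rewrite | github.com/KimJinSuAI/CodingTestPractice | 넥슨/5.py | distinctMoves
-- ===== SOURCE A (Python) =====
-- from itertools import combinations
--
-- def distinctMoves(s, n, x, y):
--     # Write your code here
--     answer = set()
--     rs = []
--     ls = []
--     needR = 0
--     needL = 0
--     for i,S in enumerate(s):
--         if S=="r":
--             rs.append(i)
--         else:
--             ls.append(i)
--     lenr = len(rs)
--     lenl = len(ls)
--
--     tmp = y-x
--     if tmp>0:
--         needR = tmp
--     else:
--         needL = -tmp
--
--     while needR<=lenr and needL <= lenl:
--         combr = list(combinations(rs,needR))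
--         combl = list(combinations(ls,needL))
--
--         for r in combr:
--             for l in combl:
--                 tmp = sorted(list(r)+list(l))
--                 st = ""
--                 for t in tmp:
--                     st+=str(s[t])
--
--                 tmp = x
--                 for i in range(len(st)):
--                     if st[i]=="r":
--                         tmp+=1
--                     else:
--                         tmp-=1
--                         if tmp<0:
--                             break
--                 else:
--                     answer.add(st)
--
--
--         needR+=1
--         needL+=1
--     return len(answer)
-- ===== SOURCE B (Python) =====
-- def distinctMoves(s, n, x, y):
--     # Count distinct valid subsequences by dynamic programming on the end
--     # position: total[p] = number of distinct subsequences of the prefix read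
--     # so far whose walk from x is legal (never steps below 0 on a non-'r' move)
--     # and ends at position p; end[c][p] = those among them that end with
--     # character c (used to deduplicate repeated characters).
--     nr = sum(1 for ch in s if ch == "r")
--     t = y - x
--     if t > nr or -t > len(s) - nr:
--         return 0
--     total = {x: 1}
--     end = {}
--     for c in s:
--         if c == "r":
--             new = {p + 1: v for p, v in total.items()}
--         else:
--             new = {p - 1: v for p, v in total.items() if p - 1 >= 0}
--         old = end.get(c, {})
--         for p, v in new.items():
--             total[p] = total.get(p, 0) + v - old.get(p, 0)
--         end[c] = new
--     return total.get(y, 0)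
-- ===== Notes on version B (the rewrite author's own statement) =====
-- stated objective: faster
-- what changed: Replaces the exponential enumeration of all (combinations of r-indices) x (combinations of other-indices) with sorting and re-simulation per pair by a single left-to-right pass that grows a dict from each distinct valid subsequence to its end position, counting entries that end at y.
import Mathlib
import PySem

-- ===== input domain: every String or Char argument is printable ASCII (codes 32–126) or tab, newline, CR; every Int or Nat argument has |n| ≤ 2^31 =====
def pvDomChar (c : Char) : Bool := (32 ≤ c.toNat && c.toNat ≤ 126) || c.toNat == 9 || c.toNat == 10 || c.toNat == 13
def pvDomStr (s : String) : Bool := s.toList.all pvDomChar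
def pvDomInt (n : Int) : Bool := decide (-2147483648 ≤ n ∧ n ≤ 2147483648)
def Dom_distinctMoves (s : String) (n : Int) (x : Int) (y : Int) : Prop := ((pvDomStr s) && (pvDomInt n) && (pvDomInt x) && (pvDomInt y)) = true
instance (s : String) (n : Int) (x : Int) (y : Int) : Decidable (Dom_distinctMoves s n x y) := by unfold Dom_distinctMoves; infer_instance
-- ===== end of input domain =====

-- B replaces A's exponential enumeration of index-combination pairs (sorted and
-- re-simulated per pair, deduplicated through a set) by one left-to-right pass
-- growing a dict from each distinct valid subsequence to its end position.

-- ===== PORT A =====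

-- the inner validity simulation: 'tmp = x; for i in range(len(st)): ...' with break / for-else
def pvSimA : Int → List Char → Bool
  | _, [] => true
  | tmp, c :: rest =>
      if c == 'r' then pvSimA (tmp + 1) rest
      else if tmp - 1 < 0 then false else pvSimA (tmp - 1) rest

-- 'tmp = sorted(list(r)+list(l)); st = "" ; for t in tmp: st += str(s[t])'
def pvMk (cs : List Char) (r l : List Int) : List Char :=
  (PySem.List.sorted (r ++ l) (fun z => z) false).map
    (fun t => (PySem.List.pyGet? cs t).getD ' ')

-- the 'while needR<=lenr and needL<=lenl' loop
def pvALoop (cs : List Char) (x : Int) (rs ls : List Int) (lenr lenl : Int)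
    (needR needL : Int) (answer : PySem.Set (List Char)) : PySem.Set (List Char) :=
  if h : needR ≤ lenr ∧ needL ≤ lenl then
    pvALoop cs x rs ls lenr lenl (needR + 1) (needL + 1)
      ((PySem.List.combinations rs needR.toNat).foldl (fun acc r =>
        (PySem.List.combinations ls needL.toNat).foldl (fun acc2 l =>
          let st := pvMk cs r l
          if pvSimA x st then PySem.Set.add acc2 st else acc2) acc) answer)
  else answer
termination_by (lenr - needR + 1).toNat
decreasing_by omega

def distinctMoves (s : String) (n : Int) (x : Int) (y : Int) : Int :=
  let cs := s.toList
  let p := (PySem.List.enumerate cs 0).foldl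
    (fun (p : List Int × List Int) e =>
      if e.2 == 'r' then (p.1 ++ [e.1], p.2) else (p.1, p.2 ++ [e.1])) ([], [])
  let rs := p.1
  let ls := p.2
  let lenr : Int := rs.length
  let lenl : Int := ls.length
  let tmp := y - x
  let needR : Int := if tmp > 0 then tmp else 0
  let needL : Int := if tmp > 0 then 0 else -tmp
  ((pvALoop cs x rs ls lenr lenl needR needL PySem.Set.empty).length : Int)

-- ===== PORT B =====

-- dict comprehension shifting every tracked end position by the step of c
def pvShift (total : PySem.Dict Int Int) (c : Char) : PySem.Dict Int Int :=
  if c == 'r' then PySem.Dict.ofList (total.items.map (fun q => (q.1 + 1, q.2)))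
  else PySem.Dict.ofList ((total.items.filter (fun q => decide (q.1 - 1 ≥ 0))).map
    (fun q => (q.1 - 1, q.2)))

-- one loop iteration: state is (total, end)
def pvBStep (st : PySem.Dict Int Int × PySem.Dict Char (PySem.Dict Int Int)) (c : Char) :
    PySem.Dict Int Int × PySem.Dict Char (PySem.Dict Int Int) :=
  let new := pvShift st.1 c
  let old := st.2.getD c PySem.Dict.empty
  let total := new.items.foldl
    (fun tot q => tot.insert q.1 (tot.getD q.1 0 + q.2 - old.getD q.1 0)) st.1
  (total, st.2.insert c new)

def distinctMoves_alt (s : String) (n : Int) (x : Int) (y : Int) : Int :=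
  let nr : Int := s.toList.foldl (fun acc ch => if ch == 'r' then acc + 1 else acc) 0
  let t := y - x
  if t > nr ∨ -t > (PySem.Str.len s : Int) - nr then 0
  else
    let st := s.toList.foldl pvBStep (PySem.Dict.empty.insert x 1, PySem.Dict.empty)
    st.1.getD y 0

-- ===== PRECONDITION & SPEC =====
def Spec_distinctMoves (s : String) (n : Int) (x : Int) (y : Int) (out : Int) : Prop := out = distinctMoves_alt s n x y
instance (s : String) (n : Int) (x : Int) (y : Int) (out : Int) : Decidable (Spec_distinctMoves s n x y out) := by unfold Spec_distinctMoves; infer_instance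

-- ===== CLAIM (what is proved, stated in full; the proofs are below) =====
def Claim_equal_distinctMoves : Prop := ∀ (s : String) (n : Int) (x : Int) (y : Int), Dom_distinctMoves s n x y → Spec_distinctMoves s n x y (distinctMoves s n x y)

-- ===== LEMMAS AND PROOFS =====

-- balance of a move string: +1 for 'r', -1 otherwise
def pvBalc (c : Char) : Int := if c = 'r' then 1 else -1
def pvBal (t : List Char) : Int := (t.map pvBalc).sum

theorem pvBal_append_singleton (t : List Char) (c : Char) :
    pvBal (t ++ [c]) = pvBal t + pvBalc c := by
  simp [pvBal]

theorem pvBal_eq_counts (t : List Char) :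
    pvBal t = (t.count 'r' : Int) - ((t.length : Int) - (t.count 'r' : Int)) := by
  induction t with
  | nil => simp [pvBal]
  | cons c t ih =>
    by_cases h : c = 'r' <;>
      simp [pvBal, pvBalc, List.map_cons, List.sum_cons, h] at * <;> omega

theorem pvSimA_append (x : Int) (t u : List Char) :
    pvSimA x (t ++ u) = (pvSimA x t && pvSimA (x + pvBal t) u) := by
  induction t generalizing x with
  | nil => simp [pvSimA, pvBal]
  | cons c t ih =>
    by_cases h : c = 'r'
    · simp only [List.cons_append, pvSimA, h]
      rw [ih]
      have : x + pvBal ('r' :: t) = x + 1 + pvBal t := by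
        simp [pvBal, pvBalc]; ring
      rw [this]
      simp
    · simp only [List.cons_append, pvSimA, beq_iff_eq, h, if_false]
      by_cases h2 : x - 1 < 0
      · simp [h2]
      · simp only [h2, if_false]
        rw [ih]
        have : x + pvBal (c :: t) = x - 1 + pvBal t := by
          simp [pvBal, pvBalc, h]; ring
        rw [this]

theorem pvSimA_append_singleton (x : Int) (t : List Char) (c : Char) :
    pvSimA x (t ++ [c]) = (pvSimA x t && (c == 'r' || decide (0 ≤ x + pvBal t - 1))) := by
  rw [pvSimA_append]
  by_cases h : c = 'r'
  · simp [pvSimA, h]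
  · have : ¬ (c == 'r') = true := by simp [h]
    by_cases h2 : x + pvBal t - 1 < 0 <;>
      simp [pvSimA, this, h2] <;> omega

-- concat form of sublist_cons_iff
theorem pv_sublist_concat_iff {α : Type} (t l : List α) (a : α) :
    t.Sublist (l ++ [a]) ↔ t.Sublist l ∨ ∃ t', t = t' ++ [a] ∧ t'.Sublist l := by
  constructor
  · intro h
    have h' := h.reverse
    simp only [List.reverse_append, List.reverse_cons, List.reverse_nil, List.nil_append,
      List.singleton_append] at h'
    rcases List.sublist_cons_iff.mp h' with h2 | ⟨r, hr, hrs⟩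
    · left
      have := h2.reverse
      simpa using this
    · right
      refine ⟨r.reverse, ?_, by simpa using hrs.reverse⟩
      have : t.reverse.reverse = (a :: r).reverse := by rw [hr]
      simpa using this
  · rintro (h | ⟨t', rfl, h⟩)
    · exact h.trans (List.sublist_append_left l [a])
    · exact h.append (List.Sublist.refl [a])

-- index lists extracted by A's enumerate loop
def pvRsOf (cs : List Char) : List Int :=
  (((PySem.List.enumerate cs 0).filter (fun e => e.2 == 'r')).map (·.1))
def pvLsOf (cs : List Char) : List Int :=
  (((PySem.List.enumerate cs 0).filter (fun e => !(e.2 == 'r'))).map (·.1))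

theorem pvEnumFold (es : List (Int × Char)) :
    ∀ acc : List Int × List Int,
      es.foldl (fun (p : List Int × List Int) e =>
        if e.2 == 'r' then (p.1 ++ [e.1], p.2) else (p.1, p.2 ++ [e.1])) acc
      = (acc.1 ++ (es.filter (fun e => e.2 == 'r')).map (·.1),
         acc.2 ++ (es.filter (fun e => !(e.2 == 'r'))).map (·.1)) := by
  induction es with
  | nil => intro acc; simp
  | cons e es ih =>
    intro acc
    rw [List.foldl_cons]
    by_cases h : e.2 = 'r'
    · rw [if_pos (by simp [h]), ih]
      simp [h, List.append_assoc]
    · rw [if_neg (by simp [h]), ih]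
      simp [h, List.append_assoc]

theorem pvMem_rsOf (cs : List Char) (i : Int) (h : i ∈ pvRsOf cs) :
    ∃ (k : Nat) (hk : k < cs.length), i = (k : Int) ∧ cs[k] = 'r' := by
  simp only [pvRsOf, List.mem_map, List.mem_filter] at h
  obtain ⟨e, ⟨he, hr⟩, hi⟩ := h
  rw [PySem.List.mem_enumerate_iff] at he
  obtain ⟨k, hk, rfl⟩ := he
  exact ⟨k, hk, by simpa using hi.symm, by simpa using hr⟩

theorem pvMem_lsOf (cs : List Char) (i : Int) (h : i ∈ pvLsOf cs) :
    ∃ (k : Nat) (hk : k < cs.length), i = (k : Int) ∧ cs[k] ≠ 'r' := by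
  simp only [pvLsOf, List.mem_map, List.mem_filter] at h
  obtain ⟨e, ⟨he, hr⟩, hi⟩ := h
  rw [PySem.List.mem_enumerate_iff] at he
  obtain ⟨k, hk, rfl⟩ := he
  refine ⟨k, hk, by simpa using hi.symm, ?_⟩
  simpa using hr

theorem pvBound_rs (cs : List Char) (i : Int) (h : i ∈ pvRsOf cs) :
    0 ≤ i ∧ i < (cs.length : Int) := by
  obtain ⟨k, hk, rfl, _⟩ := pvMem_rsOf cs i h
  constructor <;> [positivity; exact_mod_cast hk]

theorem pvBound_ls (cs : List Char) (i : Int) (h : i ∈ pvLsOf cs) :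
    0 ≤ i ∧ i < (cs.length : Int) := by
  obtain ⟨k, hk, rfl, _⟩ := pvMem_lsOf cs i h
  constructor <;> [positivity; exact_mod_cast hk]

theorem pvG_rs (cs : List Char) (i : Int) (h : i ∈ pvRsOf cs) :
    (PySem.List.pyGet? cs i).getD ' ' = 'r' := by
  obtain ⟨k, hk, rfl, hc⟩ := pvMem_rsOf cs i h
  rw [PySem.List.pyGet?_natCast cs k]
  simp [List.getElem?_eq_getElem hk, hc]

theorem pvG_ls (cs : List Char) (i : Int) (h : i ∈ pvLsOf cs) :
    (PySem.List.pyGet? cs i).getD ' ' ≠ 'r' := by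
  obtain ⟨k, hk, rfl, hc⟩ := pvMem_lsOf cs i h
  rw [PySem.List.pyGet?_natCast cs k]
  simpa [List.getElem?_eq_getElem hk] using hc

theorem pvRsOf_append (cs : List Char) (c : Char) :
    pvRsOf (cs ++ [c]) = pvRsOf cs ++ (if c = 'r' then [(cs.length : Int)] else []) := by
  simp only [pvRsOf, PySem.List.enumerate_append, List.filter_append, List.map_append]
  congr 1
  by_cases h : c = 'r' <;>
    simp [PySem.List.enumerate_cons, PySem.List.enumerate_nil, h]

theorem pvLsOf_append (cs : List Char) (c : Char) :
    pvLsOf (cs ++ [c]) = pvLsOf cs ++ (if c = 'r' then [] else [(cs.length : Int)]) := by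
  simp only [pvLsOf, PySem.List.enumerate_append, List.filter_append, List.map_append]
  congr 1
  by_cases h : c = 'r' <;>
    simp [PySem.List.enumerate_cons, PySem.List.enumerate_nil, h]

-- sorted q ++ [v] when v dominates
theorem pvSorted_concat (q : List Int) (v : Int) (h : ∀ a ∈ q, a < v) :
    PySem.List.sorted (q ++ [v]) (fun z => z) false
      = PySem.List.sorted q (fun z => z) false ++ [v] := by
  rw [PySem.List.sorted_eq_foldl_insertBy, List.foldl_append, List.foldl_cons, List.foldl_nil,
    ← PySem.List.sorted_eq_foldl_insertBy]
  apply PySem.List.insertBy_of_forall_not_before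
  intro a ha
  rw [PySem.List.mem_sorted] at ha
  simp [not_lt.mpr (le_of_lt (h a ha))]

-- pvMk is stable under extending cs, for indices below cs.length
theorem pvMk_stable (cs : List Char) (c : Char) (r l : List Int)
    (h : ∀ i ∈ r ++ l, 0 ≤ i ∧ i < (cs.length : Int)) :
    pvMk (cs ++ [c]) r l = pvMk cs r l := by
  unfold pvMk
  apply List.map_congr_left
  intro i hi
  rw [PySem.List.mem_sorted] at hi
  obtain ⟨h0, hl⟩ := h i hi
  obtain ⟨k, rfl⟩ := Int.eq_ofNat_of_zero_le h0
  have hk : k < cs.length := by exact_mod_cast hl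
  rw [PySem.List.pyGet?_natCast (cs ++ [c]) k, PySem.List.pyGet?_natCast cs k]
  rw [List.getElem?_append_left hk]

-- appending the new top index to r (resp. l) appends c to the produced string
theorem pvMk_concat_r (cs : List Char) (c : Char) (r l : List Int)
    (h : ∀ i ∈ r ++ l, 0 ≤ i ∧ i < (cs.length : Int)) :
    pvMk (cs ++ [c]) (r ++ [(cs.length : Int)]) l = pvMk cs r l ++ [c] := by
  unfold pvMk
  have hperm : ((r ++ [(cs.length : Int)]) ++ l).Perm ((r ++ l) ++ [(cs.length : Int)]) := by
    rw [List.append_assoc, List.append_assoc]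
    exact List.Perm.append_left r List.perm_append_comm
  rw [PySem.List.sorted_eq_sorted_of_perm _ _ _ (fun a b hab => hab) hperm]
  rw [pvSorted_concat _ _ (fun a ha => (h a ha).2)]
  rw [List.map_append]
  congr 1
  · apply List.map_congr_left
    intro i hi
    rw [PySem.List.mem_sorted] at hi
    obtain ⟨h0, hl⟩ := h i hi
    obtain ⟨k, rfl⟩ := Int.eq_ofNat_of_zero_le h0
    have hk : k < cs.length := by exact_mod_cast hl
    rw [PySem.List.pyGet?_natCast (cs ++ [c]) k, PySem.List.pyGet?_natCast cs k]
    rw [List.getElem?_append_left hk]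
  · simp

theorem pvMk_concat_l (cs : List Char) (c : Char) (r l : List Int)
    (h : ∀ i ∈ r ++ l, 0 ≤ i ∧ i < (cs.length : Int)) :
    pvMk (cs ++ [c]) r (l ++ [(cs.length : Int)]) = pvMk cs r l ++ [c] := by
  have hperm : (r ++ (l ++ [(cs.length : Int)])).Perm
      ((r ++ [(cs.length : Int)]) ++ l) := by
    rw [List.append_assoc]
    exact List.Perm.append_left r List.perm_append_comm
  unfold pvMk
  rw [PySem.List.sorted_eq_sorted_of_perm _ _ _ (fun a b hab => hab) hperm]
  have := pvMk_concat_r cs c r l h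
  unfold pvMk at this
  exact this

-- ===== the core characterization: representable ↔ sublist =====

theorem pvL2 (cs : List Char) (t : List Char) :
    (∃ r l, r.Sublist (pvRsOf cs) ∧ l.Sublist (pvLsOf cs) ∧ pvMk cs r l = t)
      ↔ t.Sublist cs := by
  induction cs using List.reverseRecOn generalizing t with
  | nil =>
    simp only [pvRsOf, pvLsOf, PySem.List.enumerate, List.sublist_nil]
    constructor
    · rintro ⟨r, l, hr, hl, rfl⟩
      simp at hr hl
      subst hr; subst hl
      rfl
    · rintro rfl
      exact ⟨[], [], by simp, by simp, rfl⟩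
  | append_singleton cs c ih =>
    have hbound : ∀ (r l : List Int), r.Sublist (pvRsOf cs) → l.Sublist (pvLsOf cs) →
        ∀ i ∈ r ++ l, 0 ≤ i ∧ i < (cs.length : Int) := by
      intro r l hr hl i hi
      rcases List.mem_append.mp hi with h | h
      · exact pvBound_rs cs i (hr.subset h)
      · exact pvBound_ls cs i (hl.subset h)
    constructor
    · rintro ⟨r, l, hr, hl, rfl⟩
      rw [pvRsOf_append] at hr
      rw [pvLsOf_append] at hl
      rw [pv_sublist_concat_iff]
      by_cases hc : c = 'r'
      · rw [if_pos hc] at hr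
        rw [if_pos hc, List.append_nil] at hl
        rcases (pv_sublist_concat_iff r (pvRsOf cs) _).mp hr with hr' | ⟨r', rfl, hr'⟩
        · left
          rw [pvMk_stable cs c r l (hbound r l hr' hl)]
          exact (ih _).mp ⟨r, l, hr', hl, rfl⟩
        · right
          rw [pvMk_concat_r cs c r' l (hbound r' l hr' hl)]
          exact ⟨pvMk cs r' l, rfl, (ih _).mp ⟨r', l, hr', hl, rfl⟩⟩
      · rw [if_neg hc, List.append_nil] at hr
        rw [if_neg hc] at hl
        rcases (pv_sublist_concat_iff l (pvLsOf cs) _).mp hl with hl' | ⟨l', rfl, hl'⟩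
        · left
          rw [pvMk_stable cs c r l (hbound r l hr hl')]
          exact (ih _).mp ⟨r, l, hr, hl', rfl⟩
        · right
          rw [pvMk_concat_l cs c r l' (hbound r l' hr hl')]
          exact ⟨pvMk cs r l', rfl, (ih _).mp ⟨r, l', hr, hl', rfl⟩⟩
    · intro ht
      rw [pv_sublist_concat_iff] at ht
      rcases ht with ht | ⟨t', rfl, ht⟩
      · obtain ⟨r, l, hr, hl, rfl⟩ := (ih _).mpr ht
        refine ⟨r, l, ?_, ?_, pvMk_stable cs c r l (hbound r l hr hl)⟩
        · rw [pvRsOf_append]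
          exact hr.trans (List.sublist_append_left _ _)
        · rw [pvLsOf_append]
          exact hl.trans (List.sublist_append_left _ _)
      · obtain ⟨r, l, hr, hl, rfl⟩ := (ih _).mpr ht
        by_cases hc : c = 'r'
        · refine ⟨r ++ [(cs.length : Int)], l, ?_, ?_, pvMk_concat_r cs c r l (hbound r l hr hl)⟩
          · rw [pvRsOf_append, if_pos hc]
            exact hr.append (List.Sublist.refl _)
          · rw [pvLsOf_append, if_pos hc, List.append_nil]
            exact hl
        · refine ⟨r, l ++ [(cs.length : Int)], ?_, ?_, pvMk_concat_l cs c r l (hbound r l hr hl)⟩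
          · rw [pvRsOf_append, if_neg hc, List.append_nil]
            exact hr
          · rw [pvLsOf_append, if_neg hc]
            exact hl.append (List.Sublist.refl _)

-- counts are forced
theorem pvL1 (cs : List Char) (r l : List Int) (t : List Char)
    (hr : r.Sublist (pvRsOf cs)) (hl : l.Sublist (pvLsOf cs)) (ht : pvMk cs r l = t) :
    t.count 'r' = r.length ∧ t.length = r.length + l.length := by
  subst ht
  unfold pvMk
  constructor
  · rw [List.count_eq_countP, List.countP_map]
    rw [(PySem.List.sorted_perm (r ++ l) (fun z => z) false).countP_eq]
    rw [List.countP_append]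
    have h1 : List.countP ((fun x => x == 'r') ∘ fun t => (PySem.List.pyGet? cs t).getD ' ') r
        = r.length := by
      rw [List.countP_eq_length]
      intro i hi
      simpa using pvG_rs cs i (hr.subset hi)
    have h2 : List.countP ((fun x => x == 'r') ∘ fun t => (PySem.List.pyGet? cs t).getD ' ') l
        = 0 := by
      rw [List.countP_eq_zero]
      intro i hi
      simpa using pvG_ls cs i (hl.subset hi)
    rw [h1, h2]
    omega
  · rw [List.length_map, PySem.List.length_sorted, List.length_append]

-- membership in the inner double fold
theorem pvMem_foldl_step {α : Type} (xs : List α) (g : PySem.Set (List Char) → α → PySem.Set (List Char))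
    (C : α → List Char → Prop)
    (hg : ∀ a r t, t ∈ g a r ↔ t ∈ a ∨ C r t) (acc : PySem.Set (List Char)) (t : List Char) :
    t ∈ xs.foldl g acc ↔ t ∈ acc ∨ ∃ r ∈ xs, C r t := by
  induction xs generalizing acc with
  | nil => simp
  | cons r xs ih =>
    rw [List.foldl_cons, ih]
    rw [hg]
    constructor
    · rintro ((h | h) | ⟨r', hr', h⟩)
      · exact Or.inl h
      · exact Or.inr ⟨r, by simp, h⟩
      · exact Or.inr ⟨r', by simp [hr'], h⟩
    · rintro (h | ⟨r', hr', h⟩)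
      · exact Or.inl (Or.inl h)
      · rcases List.mem_cons.mp hr' with rfl | hm
        · exact Or.inl (Or.inr h)
        · exact Or.inr ⟨r', hm, h⟩

theorem pvNodup_foldl_step {α : Type} (xs : List α)
    (g : PySem.Set (List Char) → α → PySem.Set (List Char))
    (hg : ∀ a r, a.Nodup → (g a r).Nodup) (acc : PySem.Set (List Char)) (h : acc.Nodup) :
    (xs.foldl g acc).Nodup := by
  induction xs generalizing acc with
  | nil => exact h
  | cons r xs ih => exact ih _ (hg _ _ h)

-- membership in A's while loop result
theorem pvMem_pvALoop (cs : List Char) (x : Int) (rs ls : List Int) (lenr lenl : Int)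
    (needR needL : Int) (acc : PySem.Set (List Char)) (t : List Char) :
    t ∈ pvALoop cs x rs ls lenr lenl needR needL acc
      ↔ t ∈ acc ∨ ∃ k : Nat, needR + k ≤ lenr ∧ needL + k ≤ lenl ∧
          ∃ r l, r.Sublist rs ∧ r.length = (needR + k).toNat ∧
            l.Sublist ls ∧ l.length = (needL + k).toNat ∧
            pvSimA x (pvMk cs r l) = true ∧ pvMk cs r l = t := by
  fun_induction pvALoop with
  | case1 needR needL acc h ih =>
    simp only [dite_eq_ite] at ih
    rw [ih]
    have hbig : ∀ a0 : PySem.Set (List Char), t ∈ (PySem.List.combinations rs needR.toNat).foldl (fun acc r =>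
        (PySem.List.combinations ls needL.toNat).foldl (fun acc2 l =>
          let st := pvMk cs r l
          if pvSimA x st then PySem.Set.add acc2 st else acc2) acc) a0 ↔
        t ∈ a0 ∨ ∃ r ∈ PySem.List.combinations rs needR.toNat,
          ∃ l ∈ PySem.List.combinations ls needL.toNat,
            pvSimA x (pvMk cs r l) = true ∧ pvMk cs r l = t := by
      intro a0
      have hin : ∀ (r : List Int) (a2 : PySem.Set (List Char)) (t'' : List Char),
          t'' ∈ (PySem.List.combinations ls needL.toNat).foldl (fun acc2 l =>
            if pvSimA x (pvMk cs r l) = true then PySem.Set.add acc2 (pvMk cs r l) else acc2) a2 ↔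
          t'' ∈ a2 ∨ ∃ l ∈ PySem.List.combinations ls needL.toNat,
            pvSimA x (pvMk cs r l) = true ∧ pvMk cs r l = t'' := by
        intro r a2 t''
        refine pvMem_foldl_step _ _ (fun l t'' => pvSimA x (pvMk cs r l) = true ∧ pvMk cs r l = t'') ?_ _ _
        intro a3 l t3
        split_ifs with hs
        · rw [PySem.Set.mem_add]
          constructor
          · rintro (h1 | h1)
            · exact Or.inl h1
            · exact Or.inr ⟨hs, h1.symm⟩
          · rintro (h1 | ⟨_, h1⟩)
            · exact Or.inl h1
            · exact Or.inr h1.symm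
        · constructor
          · exact Or.inl
          · rintro (h1 | ⟨h1, _⟩)
            · exact h1
            · exact absurd h1 hs
      refine (pvMem_foldl_step _ _ (fun r t => ∃ l ∈ PySem.List.combinations ls needL.toNat,
          pvSimA x (pvMk cs r l) = true ∧ pvMk cs r l = t) ?_ _ _)
      intro a r t'
      exact hin r a t'
    rw [hbig]
    constructor
    · rintro ((hb | ⟨r, hrm, l, hlm, hsim, hmk⟩) | ⟨k, h1, h2, r, l, hr, hrl, hl, hll, hsim, hmk⟩)
      · exact Or.inl hb
      · rw [PySem.List.mem_combinations_iff] at hrm hlm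
        exact Or.inr ⟨0, by simpa using h.1, by simpa using h.2, r, l, hrm.1,
          by simpa using hrm.2, hlm.1, by simpa using hlm.2, hsim, hmk⟩
      · refine Or.inr ⟨k + 1, by push_cast at h1 ⊢; omega, by push_cast at h2 ⊢; omega,
          r, l, hr, by push_cast at hrl ⊢; omega, hl, by push_cast at hll ⊢; omega, hsim, hmk⟩
    · rintro (ha | ⟨k, h1, h2, r, l, hr, hrl, hl, hll, hsim, hmk⟩)
      · exact Or.inl (Or.inl ha)
      · cases k with
        | zero =>
          refine Or.inl (Or.inr ⟨r, ?_, l, ?_, hsim, hmk⟩) <;>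
            rw [PySem.List.mem_combinations_iff]
          · exact ⟨hr, by simpa using hrl⟩
          · exact ⟨hl, by simpa using hll⟩
        | succ k =>
          refine Or.inr ⟨k, by push_cast at h1 ⊢; omega, by push_cast at h2 ⊢; omega,
            r, l, hr, by push_cast at hrl ⊢; omega, hl, by push_cast at hll ⊢; omega, hsim, hmk⟩
  | case2 needR needL acc h =>
    constructor
    · exact Or.inl
    · rintro (ha | ⟨k, hk1, hk2, _⟩)
      · exact ha
      · exfalso
        have : (0:Int) ≤ (k:Int) := Int.natCast_nonneg k
        rw [not_and_or] at h
        rcases h with h | h <;> omega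



theorem pvNodup_pvALoop (cs : List Char) (x : Int) (rs ls : List Int) (lenr lenl : Int)
    (needR needL : Int) (acc : PySem.Set (List Char)) (h : acc.Nodup) :
    (pvALoop cs x rs ls lenr lenl needR needL acc).Nodup := by
  fun_induction pvALoop with
  | case1 needR needL acc hc ih =>
    apply ih
    apply pvNodup_foldl_step
    · intro a r ha
      apply pvNodup_foldl_step
      · intro a2 l ha2
        dsimp only
        split_ifs with hs
        · exact PySem.Set.nodup_add _ _ ha2
        · exact ha2
      · exact ha
    · exact h
  | case2 needR needL acc hc => exact h

-- ghost apparatus for the proof: the dict of all distinct valid subsequence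
-- strings of the processed prefix, mapped to their end positions
def pvGStep (d : PySem.Dict (List Char) Int) (c : Char) : PySem.Dict (List Char) Int :=
  let add : List (List Char × Int) :=
    if c == 'r' then d.items.map (fun p => (p.1 ++ [c], p.2 + 1))
    else (d.items.filter (fun p => decide (p.2 - 1 ≥ 0))).map (fun p => (p.1 ++ [c], p.2 - 1))
  PySem.Dict.update d add

-- ghost invariant
def pvInv (x : Int) (u : List Char) (d : PySem.Dict (List Char) Int) : Prop :=
  d.keys.Nodup ∧ (∀ p ∈ d.items, p.2 = x + pvBal p.1) ∧
    (∀ t, t ∈ d.keys ↔ (t.Sublist u ∧ pvSimA x t = true))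

theorem pvItems_foldl_insert (l : List (List Char × Int)) (d : PySem.Dict (List Char) Int)
    (V : List Char × Int → Prop) (hl : ∀ q ∈ l, V q) (hd : ∀ p ∈ d.items, V p) :
    ∀ p ∈ (l.foldl (fun d q => d.insert q.1 q.2) d).items, V p := by
  induction l generalizing d with
  | nil => exact hd
  | cons q l ih =>
    rw [List.foldl_cons]
    apply ih
    · intro q' hq'
      exact hl q' (List.mem_cons_of_mem _ hq')
    · intro p hp
      rw [PySem.Dict.mem_items_insert] at hp
      rcases hp with rfl | ⟨hp, _⟩
      · exact hl q (List.mem_cons_self ..)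
      · exact hd p hp

theorem pvInv_step (x : Int) (u : List Char) (c : Char) (d : PySem.Dict (List Char) Int)
    (h : pvInv x u d) : pvInv x (u ++ [c]) (pvGStep d c) := by
  obtain ⟨hnd, hval, hmem⟩ := h
  have hkeys : d.keys = d.items.map (·.1) := rfl
  set addL : List (List Char × Int) :=
    (if c == 'r' then d.items.map (fun p => (p.1 ++ [c], p.2 + 1))
     else (d.items.filter (fun p => decide (p.2 - 1 ≥ 0))).map (fun p => (p.1 ++ [c], p.2 - 1)))
    with haddL
  have hstep : pvGStep d c = addL.foldl (fun d q => d.insert q.1 q.2) d := rfl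
  have haddV : ∀ q ∈ addL, q.2 = x + pvBal q.1 := by
    intro q hq
    rw [haddL] at hq
    by_cases hc : c = 'r'
    · rw [if_pos (by simp [hc])] at hq
      obtain ⟨p, hp, rfl⟩ := List.mem_map.mp hq
      have := hval p hp
      dsimp only
      simp [pvBal_append_singleton, pvBalc, hc]
      omega
    · rw [if_neg (by simp [hc])] at hq
      obtain ⟨p, hp, rfl⟩ := List.mem_map.mp hq
      have := hval p (List.mem_of_mem_filter hp)
      dsimp only
      simp [pvBal_append_singleton, pvBalc, hc]
      omega
  have haddK : ∀ t, t ∈ addL.map (·.1) ↔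
      ∃ t', t' ∈ d.keys ∧ pvSimA x (t' ++ [c]) = true ∧ t = t' ++ [c] := by
    intro t
    rw [haddL]
    by_cases hc : c = 'r'
    · rw [if_pos (by simp [hc])]
      simp only [List.map_map, List.mem_map, Function.comp]
      constructor
      · rintro ⟨p, hp, rfl⟩
        refine ⟨p.1, by rw [hkeys]; exact List.mem_map_of_mem hp, ?_, rfl⟩
        rw [pvSimA_append_singleton]
        have hsim := ((hmem p.1).mp (by rw [hkeys]; exact List.mem_map_of_mem hp)).2
        simp [hsim, hc]
      · rintro ⟨t', ht', _, rfl⟩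
        rw [hkeys] at ht'
        obtain ⟨p, hp, rfl⟩ := List.mem_map.mp ht'
        exact ⟨p, hp, rfl⟩
    · rw [if_neg (by simp [hc])]
      simp only [List.map_map, List.mem_map, Function.comp, List.mem_filter]
      constructor
      · rintro ⟨p, ⟨hp, hge⟩, rfl⟩
        refine ⟨p.1, by rw [hkeys]; exact List.mem_map_of_mem hp, ?_, rfl⟩
        rw [pvSimA_append_singleton]
        have hsim := ((hmem p.1).mp (by rw [hkeys]; exact List.mem_map_of_mem hp)).2
        have hv := hval p hp
        simp only [hsim, Bool.true_and, Bool.or_eq_true, beq_iff_eq, decide_eq_true_eq]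
        right
        simp only [decide_eq_true_eq] at hge
        omega
      · rintro ⟨t', ht', hsimc, rfl⟩
        rw [hkeys] at ht'
        obtain ⟨p, hp, rfl⟩ := List.mem_map.mp ht'
        refine ⟨p, ⟨hp, ?_⟩, rfl⟩
        rw [pvSimA_append_singleton] at hsimc
        have hv := hval p hp
        simp only [Bool.and_eq_true, Bool.or_eq_true, beq_iff_eq, decide_eq_true_eq] at hsimc
        rcases hsimc.2 with h1 | h1
        · exact absurd h1 hc
        · simp only [decide_eq_true_eq]
          omega
  rw [hstep]
  refine ⟨?_, ?_, ?_⟩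
  · exact PySem.Dict.nodup_keys_foldl_insert_key addL Prod.fst (fun _ q => q.2) d hnd
  · exact pvItems_foldl_insert addL d _ haddV hval
  · intro t
    have hk : (addL.foldl (fun d q => d.insert q.1 q.2) d).keys
        = PySem.Set.update d.keys (addL.map (·.1)) :=
      PySem.Dict.keys_foldl_insert_key addL Prod.fst (fun _ q => q.2) d
    rw [hk, PySem.Set.mem_update, hmem, haddK, pv_sublist_concat_iff]
    constructor
    · rintro (⟨hsub, hsim⟩ | ⟨t', ht', hsimc, rfl⟩)
      · exact ⟨Or.inl hsub, hsim⟩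
      · obtain ⟨hsub', _⟩ := (hmem t').mp ht'
        exact ⟨Or.inr ⟨t', rfl, hsub'⟩, hsimc⟩
    · rintro ⟨hsub | ⟨t', rfl, hsub⟩, hsim⟩
      · exact Or.inl ⟨hsub, hsim⟩
      · refine Or.inr ⟨t', ?_, hsim, rfl⟩
        rw [hmem]
        refine ⟨hsub, ?_⟩
        rw [pvSimA_append_singleton] at hsim
        exact (Bool.and_eq_true ..).mp hsim |>.1

theorem pvInv_foldl (x : Int) (cs : List Char) :
    pvInv x cs (cs.foldl pvGStep (PySem.Dict.empty.insert [] x)) := by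
  induction cs using List.reverseRecOn with
  | nil =>
    rw [List.foldl_nil]
    have hk : (PySem.Dict.empty.insert ([] : List Char) x).keys = [[]] := rfl
    refine ⟨by rw [hk]; exact List.nodup_singleton _, ?_, ?_⟩
    · intro p hp
      have : p = ([], x) := by
        have : (PySem.Dict.empty.insert ([] : List Char) x).items = [([], x)] := by rfl
        rw [this] at hp
        simpa using hp
      rw [this]
      simp [pvBal]
    · intro t
      rw [hk]
      simp
      intro h
      simp [h, pvSimA]
  | append_singleton u c ih =>
    rw [List.foldl_append, List.foldl_cons, List.foldl_nil]
    exact pvInv_step x u c _ ih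

-- ===== counting by end position: the B-side quantities =====

-- all distinct valid subsequence strings of u (ghost)
def pvK (x : Int) (u : List Char) : List (List Char) :=
  (u.foldl pvGStep (PySem.Dict.empty.insert [] x)).keys

-- how many of them end at position p / end at position p with last character c
def pvN (x : Int) (u : List Char) (p : Int) : Nat :=
  (pvK x u).countP (fun t => decide (x + pvBal t = p))

def pvEndsW (t : List Char) (c : Char) : Bool := t.getLast? == some c

def pvE (x : Int) (u : List Char) (c : Char) (p : Int) : Nat :=
  (pvK x u).countP (fun t => pvEndsW t c && decide (x + pvBal t = p))

theorem pvK_nodup (x : Int) (u : List Char) : (pvK x u).Nodup := (pvInv_foldl x u).1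

theorem pvK_mem (x : Int) (u : List Char) (t : List Char) :
    t ∈ pvK x u ↔ t.Sublist u ∧ pvSimA x t = true := (pvInv_foldl x u).2.2 t

theorem pvEndsW_concat (b : List Char) (c c' : Char) :
    pvEndsW (b ++ [c]) c' = (c == c') := by
  simp [pvEndsW]

theorem pvEndsW_iff (t : List Char) (c : Char) :
    pvEndsW t c = true ↔ ∃ b, t = b ++ [c] := by
  induction t using List.reverseRecOn with
  | nil =>
    simp [pvEndsW]
  | append_singleton b a _ =>
    rw [pvEndsW_concat]
    simp only [beq_iff_eq]
    constructor
    · rintro rfl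
      exact ⟨b, rfl⟩
    · rintro ⟨b', hb'⟩
      have := congrArg List.getLast? hb'
      simpa [List.getLast?_concat] using this

theorem pvConcat_sublist_concat {b u : List Char} {c : Char}
    (h : (b ++ [c]).Sublist (u ++ [c])) : b.Sublist u := by
  have h' := h.reverse
  simp only [List.reverse_append, List.reverse_cons, List.reverse_nil, List.nil_append,
    List.singleton_append] at h'
  have := (List.cons_sublist_cons).mp h'
  simpa using this.reverse

theorem pvCountP_eq_of_iff {l₁ l₂ : List (List Char)} (h₁ : l₁.Nodup) (h₂ : l₂.Nodup)
    (f g : List Char → Bool) (h : ∀ a, (a ∈ l₁ ∧ f a = true) ↔ (a ∈ l₂ ∧ g a = true)) :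
    l₁.countP f = l₂.countP g := by
  rw [List.countP_eq_length_filter, List.countP_eq_length_filter]
  apply List.Perm.length_eq
  rw [List.perm_ext_iff_of_nodup (h₁.filter _) (h₂.filter _)]
  intro a
  rw [List.mem_filter, List.mem_filter]
  exact h a

theorem pvCountP_concat_bij {l₁ l₂ : List (List Char)} (h₁ : l₁.Nodup) (h₂ : l₂.Nodup)
    (c : Char) (f g : List Char → Bool)
    (h : ∀ a, (a ∈ l₁ ∧ f a = true) ↔ ∃ b, a = b ++ [c] ∧ b ∈ l₂ ∧ g b = true) :
    l₁.countP f = l₂.countP g := by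
  rw [List.countP_eq_length_filter, List.countP_eq_length_filter]
  have hinj : Function.Injective (fun b : List Char => b ++ [c]) := by
    intro a b hab
    have := congrArg List.dropLast hab
    simpa [List.dropLast_concat] using this
  have hperm : (l₁.filter f).Perm ((l₂.filter g).map (fun b => b ++ [c])) := by
    rw [List.perm_ext_iff_of_nodup (h₁.filter _) ((h₂.filter _).map hinj)]
    intro a
    rw [List.mem_filter, List.mem_map]
    constructor
    · intro ha
      obtain ⟨b, rfl, hb, hg⟩ := (h a).mp ha
      exact ⟨b, List.mem_filter.mpr ⟨hb, hg⟩, rfl⟩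
    · rintro ⟨b, hb, rfl⟩
      rw [List.mem_filter] at hb
      exact (h _).mpr ⟨b, rfl, hb.1, hb.2⟩
  rw [hperm.length_eq, List.length_map]

theorem pvCountP_split (l : List (List Char)) (f g : List Char → Bool) :
    l.countP f = l.countP (fun a => g a && f a) + l.countP (fun a => !g a && f a) := by
  rw [List.countP_eq_length_filter (p := f), List.length_eq_countP_add_countP (p := g),
    List.countP_filter, List.countP_filter]
  congr 1
  apply List.countP_congr
  intro a _
  simp

-- new strings ending with the appended character, counted by where they came from
theorem pvS1 (x : Int) (u : List Char) (c : Char) (p : Int) (hc : c = 'r' ∨ 0 ≤ p) :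
    pvE x (u ++ [c]) c p = pvN x u (p - pvBalc c) := by
  apply pvCountP_concat_bij (pvK_nodup x (u ++ [c])) (pvK_nodup x u)
  intro a
  constructor
  · rintro ⟨ha, hf⟩
    rw [Bool.and_eq_true] at hf
    obtain ⟨b, rfl⟩ := (pvEndsW_iff a c).mp hf.1
    rw [pvK_mem] at ha
    refine ⟨b, rfl, ?_, ?_⟩
    · rw [pvK_mem]
      refine ⟨pvConcat_sublist_concat ha.1, ?_⟩
      have := ha.2
      rw [pvSimA_append_singleton, Bool.and_eq_true] at this
      exact this.1
    · simp only [decide_eq_true_eq] at hf ⊢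
      rw [pvBal_append_singleton] at hf
      omega
  · rintro ⟨b, rfl, hb, hg⟩
    rw [pvK_mem] at hb
    simp only [decide_eq_true_eq] at hg
    refine ⟨?_, ?_⟩
    · rw [pvK_mem]
      refine ⟨hb.1.append (List.Sublist.refl _), ?_⟩
      rw [pvSimA_append_singleton, hb.2, Bool.true_and]
      rcases hc with rfl | hp
      · simp
      · rcases eq_or_ne c 'r' with rfl | hcr
        · simp
        · have : pvBalc c = -1 := by simp [pvBalc, hcr]
          simp only [Bool.or_eq_true, beq_iff_eq, decide_eq_true_eq]
          right
          omega
    · rw [Bool.and_eq_true]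
      refine ⟨by rw [pvEndsW_concat]; simp, ?_⟩
      simp only [decide_eq_true_eq]
      rw [pvBal_append_singleton]
      omega

theorem pvEW_zero_neg (x : Int) (u : List Char) (c : Char) (p : Int) (hc : c ≠ 'r') (hp : p < 0) :
    pvE x u c p = 0 := by
  rw [pvE, List.countP_eq_zero]
  intro a ha hf
  rw [Bool.and_eq_true] at hf
  obtain ⟨b, rfl⟩ := (pvEndsW_iff a c).mp hf.1
  rw [pvK_mem] at ha
  have hs := ha.2
  rw [pvSimA_append_singleton, Bool.and_eq_true] at hs
  rcases (Bool.or_eq_true ..).mp hs.2 with h1 | h1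
  · exact hc (by simpa using h1)
  · simp only [decide_eq_true_eq] at h1 hf
    rw [pvBal_append_singleton] at hf
    have : pvBalc c = -1 := by simp [pvBalc, hc]
    omega

theorem pvE_zero_of_N (x : Int) (u : List Char) (c : Char) (p : Int)
    (hN : pvN x u (p - pvBalc c) = 0) : pvE x u c p = 0 := by
  rw [pvE, List.countP_eq_zero]
  intro a ha hf
  rw [Bool.and_eq_true] at hf
  obtain ⟨b, rfl⟩ := (pvEndsW_iff a c).mp hf.1
  rw [pvK_mem] at ha
  have hbK : b ∈ pvK x u := by
    rw [pvK_mem]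
    have hs := ha.2
    rw [pvSimA_append_singleton, Bool.and_eq_true] at hs
    exact ⟨(List.sublist_append_left b [c]).trans ha.1, hs.1⟩
  have : 0 < pvN x u (p - pvBalc c) := by
    rw [pvN, List.countP_pos_iff]
    refine ⟨b, hbK, ?_⟩
    simp only [decide_eq_true_eq] at hf ⊢
    rw [pvBal_append_singleton] at hf
    omega
  omega

theorem pvS2 (x : Int) (u : List Char) (c c' : Char) (p : Int) (hne : c' ≠ c) :
    pvE x (u ++ [c]) c' p = pvE x u c' p := by
  apply pvCountP_eq_of_iff (pvK_nodup x (u ++ [c])) (pvK_nodup x u)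
  intro a
  rw [pvK_mem, pvK_mem]
  constructor
  · rintro ⟨⟨hsub, hval⟩, hf⟩
    rcases (pv_sublist_concat_iff a u c).mp hsub with h | ⟨b, rfl, hb⟩
    · exact ⟨⟨h, hval⟩, hf⟩
    · rw [Bool.and_eq_true] at hf
      rw [pvEndsW_concat] at hf
      exact absurd (by simpa using hf.1) hne.symm
  · rintro ⟨⟨hsub, hval⟩, hf⟩
    exact ⟨⟨hsub.trans (List.sublist_append_left u [c]), hval⟩, hf⟩

theorem pvS3 (x : Int) (u : List Char) (c : Char) (p : Int) :
    pvN x (u ++ [c]) p + pvE x u c p = pvN x u p + pvE x (u ++ [c]) c p := by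
  have hsplit : ∀ v : List Char,
      pvN x v p = pvE x v c p + (pvK x v).countP
        (fun a => !pvEndsW a c && decide (x + pvBal a = p)) := by
    intro v
    exact pvCountP_split (pvK x v) _ (fun a => pvEndsW a c)
  have hrest : (pvK x (u ++ [c])).countP (fun a => !pvEndsW a c && decide (x + pvBal a = p))
      = (pvK x u).countP (fun a => !pvEndsW a c && decide (x + pvBal a = p)) := by
    apply pvCountP_eq_of_iff (pvK_nodup x (u ++ [c])) (pvK_nodup x u)
    intro a
    rw [pvK_mem, pvK_mem]
    constructor
    · rintro ⟨⟨hsub, hval⟩, hf⟩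
      rcases (pv_sublist_concat_iff a u c).mp hsub with h | ⟨b, rfl, hb⟩
      · exact ⟨⟨h, hval⟩, hf⟩
      · rw [Bool.and_eq_true] at hf
        rw [pvEndsW_concat] at hf
        simp at hf
    · rintro ⟨⟨hsub, hval⟩, hf⟩
      exact ⟨⟨hsub.trans (List.sublist_append_left u [c]), hval⟩, hf⟩
  rw [hsplit (u ++ [c]), hsplit u, hrest]
  omega

-- ===== dict lemmas for B's step =====

theorem pvLookup_of_mem {l : List (Int × Int)} (hnd : (l.map (·.1)).Nodup) {p : Int} {v : Int}
    (h : (p, v) ∈ l) : l.lookup p = some v := by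
  induction l with
  | nil => simp at h
  | cons q l ih =>
    obtain ⟨qk, qv⟩ := q
    rcases List.mem_cons.mp h with heq | hm
    · rw [Prod.mk.injEq] at heq
      simp [List.lookup, heq.1, heq.2]
    · have hne : (p == qk) = false := by
        simp only [beq_eq_false_iff_ne, ne_eq]
        rintro rfl
        exact (List.nodup_cons.mp hnd).1 (List.mem_map.mpr ⟨(p, v), hm, rfl⟩)
      simp only [List.lookup, hne]
      exact ih (List.nodup_cons.mp hnd).2 hm

theorem pvLookup_of_not_mem {l : List (Int × Int)} {p : Int} (h : p ∉ l.map (·.1)) :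
    l.lookup p = none := by
  induction l with
  | nil => rfl
  | cons q l ih =>
    obtain ⟨qk, qv⟩ := q
    simp only [List.map_cons, List.mem_cons] at h
    push_neg at h
    have hne : (p == qk) = false := by
      simp only [beq_eq_false_iff_ne, ne_eq]
      exact h.1
    simp only [List.lookup, hne]
    exact ih h.2

theorem pvFold_upd_not_mem (old : PySem.Dict Int Int) (p : Int) :
    ∀ (l : List (Int × Int)), p ∉ l.map (·.1) →
      ∀ total : PySem.Dict Int Int,
        (l.foldl (fun tot q => tot.insert q.1 (tot.getD q.1 0 + q.2 - old.getD q.1 0)) total).getD p 0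
          = total.getD p 0 := by
  intro l
  induction l with
  | nil => intro _ total; rfl
  | cons q l ih =>
    intro hp total
    simp only [List.map_cons, List.mem_cons] at hp
    push_neg at hp
    rw [List.foldl_cons, ih hp.2, PySem.Dict.getD_insert, if_neg hp.1]

theorem pvFold_upd (old : PySem.Dict Int Int) (p : Int) :
    ∀ (l : List (Int × Int)), (l.map (·.1)).Nodup →
      ∀ total : PySem.Dict Int Int,
        (l.foldl (fun tot q => tot.insert q.1 (tot.getD q.1 0 + q.2 - old.getD q.1 0)) total).getD p 0
          = match l.lookup p with
            | some v => total.getD p 0 + v - old.getD p 0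
            | none => total.getD p 0 := by
  intro l
  induction l with
  | nil => intro _ total; rfl
  | cons q l ih =>
    intro hnd total
    obtain ⟨hq, hnd'⟩ := List.nodup_cons.mp hnd
    obtain ⟨qk, qv⟩ := q
    rw [List.foldl_cons]
    by_cases hpq : p = qk
    · subst hpq
      rw [pvFold_upd_not_mem old p l hq]
      rw [PySem.Dict.getD_insert_self]
      simp [List.lookup]
    · rw [ih hnd']
      have hne : (p == qk) = false := by
        simp only [beq_eq_false_iff_ne, ne_eq]
        exact hpq
      have hl : ((qk, qv) :: l).lookup p = l.lookup p := by
        simp only [List.lookup, hne]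
      rw [hl]
      have hins : (total.insert qk (total.getD qk 0 + qv - old.getD qk 0)).getD p 0
          = total.getD p 0 := by
        rw [PySem.Dict.getD_insert, if_neg hpq]
      cases l.lookup p <;> simp [hins]

theorem pvGetD_of_mem_items {d : PySem.Dict Int Int} (hnd : d.keys.Nodup) {p v : Int}
    (h : (p, v) ∈ d.items) : d.getD p 0 = v := by
  rw [PySem.Dict.getD_eq_get?_getD, PySem.Dict.get?_of_mem_items _ h hnd]
  rfl

theorem pvGetD_of_not_mem_keys {d : PySem.Dict Int Int} {p : Int} (h : p ∉ d.keys) :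
    d.getD p 0 = 0 := by
  apply PySem.Dict.getD_of_not_contains
  rw [← Bool.not_eq_true, PySem.Dict.contains_iff_mem_keys]
  exact h

theorem pvShift_items (total : PySem.Dict Int Int) (c : Char) (hnd : total.keys.Nodup) :
    (pvShift total c).items
      = (if c == 'r' then total.items.map (fun q => (q.1 + 1, q.2))
         else (total.items.filter (fun q => decide (q.1 - 1 ≥ 0))).map (fun q => (q.1 - 1, q.2))) := by
  have hkeys : total.keys = total.items.map (·.1) := rfl
  rw [hkeys] at hnd
  by_cases hc : c = 'r'
  · rw [pvShift, if_pos (by simp [hc]), if_pos (by simp [hc])]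
    have := PySem.Dict.items_foldl_insert_fresh
      (total.items.map (fun q => (q.1 + 1, q.2))) (fun q => q.1) (fun q => q.2)
      PySem.Dict.empty (by intro a _; exact PySem.Dict.contains_empty _)
      (by
        rw [List.map_map, show ((fun q : Int × Int => q.1) ∘ fun q : Int × Int => (q.1 + 1, q.2))
          = (fun a => a + 1) ∘ (·.1) from rfl, ← List.map_map]
        exact hnd.map (fun a b h => by omega))
    simpa using this
  · rw [pvShift, if_neg (by simp [hc]), if_neg (by simp [hc])]
    have hndf : (((total.items.filter (fun q => decide (q.1 - 1 ≥ 0))).map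
        (fun q => (q.1 - 1, q.2))).map (fun q : Int × Int => q.1)).Nodup := by
      rw [List.map_map, show ((fun q : Int × Int => q.1) ∘ fun q : Int × Int => (q.1 - 1, q.2))
        = (fun a => a - 1) ∘ (·.1) from rfl, ← List.map_map]
      exact ((hnd.sublist (List.filter_sublist.map _)).map (fun a b h => by omega))
    have := PySem.Dict.items_foldl_insert_fresh
      ((total.items.filter (fun q => decide (q.1 - 1 ≥ 0))).map (fun q => (q.1 - 1, q.2)))
      (fun q => q.1) (fun q => q.2)
      PySem.Dict.empty (by intro a _; exact PySem.Dict.contains_empty _) hndf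
    simpa using this

theorem pvShift_keys_nodup (total : PySem.Dict Int Int) (c : Char) (hnd : total.keys.Nodup) :
    (pvShift total c).keys.Nodup := by
  have hkeys : total.keys = total.items.map (·.1) := rfl
  have hkeys' : (pvShift total c).keys = (pvShift total c).items.map (·.1) := rfl
  rw [hkeys', pvShift_items total c hnd]
  rw [hkeys] at hnd
  by_cases hc : c = 'r'
  · rw [if_pos (by simp [hc])]
    rw [List.map_map, show ((fun q : Int × Int => q.1) ∘ fun q : Int × Int => (q.1 + 1, q.2))
      = (fun a => a + 1) ∘ (·.1) from rfl, ← List.map_map]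
    exact hnd.map (fun a b h => by omega)
  · rw [if_neg (by simp [hc])]
    rw [List.map_map, show ((fun q : Int × Int => q.1) ∘ fun q : Int × Int => (q.1 - 1, q.2))
      = (fun a => a - 1) ∘ (·.1) from rfl, ← List.map_map]
    exact ((hnd.sublist (List.filter_sublist.map _)).map (fun a b h => by omega))

theorem pvShift_getD (total : PySem.Dict Int Int) (c : Char) (hnd : total.keys.Nodup) (p : Int) :
    (pvShift total c).getD p 0
      = (if c == 'r' then total.getD (p - 1) 0 else if 0 ≤ p then total.getD (p + 1) 0 else 0) := by
  have hkeys : total.keys = total.items.map (·.1) := rfl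
  have hkeys' : (pvShift total c).keys = (pvShift total c).items.map (·.1) := rfl
  have hnds := pvShift_keys_nodup total c hnd
  have hitems := pvShift_items total c hnd
  by_cases hc : c = 'r'
  · rw [if_pos (by simp [hc])]
    rw [if_pos (by simp [hc])] at hitems
    by_cases hp : (p - 1) ∈ total.keys
    · rw [hkeys] at hp
      obtain ⟨q, hq, hq1⟩ := List.mem_map.mp hp
      have hqpair : ((p - 1 : Int), q.2) ∈ total.items := by
        have : q = (p - 1, q.2) := Prod.ext hq1 rfl
        rwa [this] at hq
      have hnew : ((p : Int), q.2) ∈ (pvShift total c).items := by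
        rw [hitems]
        refine List.mem_map.mpr ⟨(p - 1, q.2), hqpair, ?_⟩
        simp only [Prod.mk.injEq]
        exact ⟨by omega, trivial⟩
      rw [pvGetD_of_mem_items hnds hnew, pvGetD_of_mem_items hnd hqpair]
    · have hpn : p ∉ (pvShift total c).keys := by
        rw [hkeys', hitems]
        intro hm
        rw [List.map_map] at hm
        obtain ⟨q, hq, hq1⟩ := List.mem_map.mp hm
        apply hp
        rw [hkeys]
        refine List.mem_map.mpr ⟨q, hq, ?_⟩
        simp at hq1
        omega
      rw [pvGetD_of_not_mem_keys hpn, pvGetD_of_not_mem_keys hp]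
  · rw [if_neg (by simp [hc])]
    rw [if_neg (by simp [hc])] at hitems
    by_cases hp0 : 0 ≤ p
    · rw [if_pos hp0]
      by_cases hp : (p + 1) ∈ total.keys
      · rw [hkeys] at hp
        obtain ⟨q, hq, hq1⟩ := List.mem_map.mp hp
        have hqpair : ((p + 1 : Int), q.2) ∈ total.items := by
          have : q = (p + 1, q.2) := Prod.ext hq1 rfl
          rwa [this] at hq
        have hnew : ((p : Int), q.2) ∈ (pvShift total c).items := by
          rw [hitems]
          refine List.mem_map.mpr ⟨(p + 1, q.2), ?_, ?_⟩
          · rw [List.mem_filter]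
            exact ⟨hqpair, by simp only [decide_eq_true_eq]; omega⟩
          · simp only [Prod.mk.injEq]
            exact ⟨by omega, trivial⟩
        rw [pvGetD_of_mem_items hnds hnew, pvGetD_of_mem_items hnd hqpair]
      · have hpn : p ∉ (pvShift total c).keys := by
          rw [hkeys', hitems]
          intro hm
          rw [List.map_map] at hm
          obtain ⟨q, hq, hq1⟩ := List.mem_map.mp hm
          rw [List.mem_filter] at hq
          apply hp
          rw [hkeys]
          refine List.mem_map.mpr ⟨q, hq.1, ?_⟩
          simp at hq1
          omega
        rw [pvGetD_of_not_mem_keys hpn, pvGetD_of_not_mem_keys hp]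
    · rw [if_neg hp0]
      have hpn : p ∉ (pvShift total c).keys := by
        rw [hkeys', hitems]
        intro hm
        rw [List.map_map] at hm
        obtain ⟨q, hq, hq1⟩ := List.mem_map.mp hm
        rw [List.mem_filter] at hq
        simp at hq1 hq
        omega
      rw [pvGetD_of_not_mem_keys hpn]

-- ===== B invariant =====

def pvInv2 (x : Int) (u : List Char)
    (st : PySem.Dict Int Int × PySem.Dict Char (PySem.Dict Int Int)) : Prop :=
  st.1.keys.Nodup ∧ (∀ p, st.1.getD p 0 = (pvN x u p : Int)) ∧
    (∀ c p, (st.2.getD c PySem.Dict.empty).getD p 0 = (pvE x u c p : Int))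

theorem pvInv2_step (x : Int) (u : List Char) (c : Char)
    (st : PySem.Dict Int Int × PySem.Dict Char (PySem.Dict Int Int))
    (h : pvInv2 x u st) : pvInv2 x (u ++ [c]) (pvBStep st c) := by
  obtain ⟨hnd, htot, hend⟩ := h
  have hnewnd : (pvShift st.1 c).keys.Nodup := pvShift_keys_nodup st.1 c hnd
  have hnewgetD := pvShift_getD st.1 c hnd
  have hold : ∀ p, (st.2.getD c PySem.Dict.empty).getD p 0 = (pvE x u c p : Int) := hend c
  have hitemsnd : ((pvShift st.1 c).items.map (·.1)).Nodup := hnewnd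
  have hEprime : ∀ p, (pvE x (u ++ [c]) c p : Int) = (pvShift st.1 c).getD p 0 := by
    intro p
    rw [hnewgetD p]
    by_cases hc : c = 'r'
    · rw [if_pos (by simp [hc])]
      rw [pvS1 x u c p (Or.inl hc), htot]
      have : pvBalc c = 1 := by simp [pvBalc, hc]
      rw [this]
    · rw [if_neg (by simp [hc])]
      have hbal : pvBalc c = -1 := by simp [pvBalc, hc]
      by_cases hp0 : 0 ≤ p
      · rw [if_pos hp0, pvS1 x u c p (Or.inr hp0), htot, hbal]
        norm_num
      · rw [if_neg hp0, pvEW_zero_neg x (u ++ [c]) c p hc (by omega)]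
        rfl
  have hgetTot : ∀ p, ((pvBStep st c).1).getD p 0
      = if p ∈ (pvShift st.1 c).keys
        then st.1.getD p 0 + (pvShift st.1 c).getD p 0 - (st.2.getD c PySem.Dict.empty).getD p 0
        else st.1.getD p 0 := by
    intro p
    show ((pvShift st.1 c).items.foldl _ st.1).getD p 0 = _
    rw [pvFold_upd (st.2.getD c PySem.Dict.empty) p (pvShift st.1 c).items hitemsnd st.1]
    by_cases hmem : p ∈ (pvShift st.1 c).keys
    · obtain ⟨q, hq, hq1⟩ := List.mem_map.mp hmem
      have hqpair : (p, q.2) ∈ (pvShift st.1 c).items := by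
        have : q = (p, q.2) := Prod.ext hq1 rfl
        rwa [this] at hq
      rw [pvLookup_of_mem hitemsnd hqpair, if_pos hmem,
        pvGetD_of_mem_items hnewnd hqpair]
    · rw [pvLookup_of_not_mem (by exact hmem), if_neg hmem]
  refine ⟨?_, ?_, ?_⟩
  · exact PySem.Dict.nodup_keys_foldl_insert_key (pvShift st.1 c).items Prod.fst _ st.1 hnd
  · intro p
    rw [hgetTot p]
    have hS3 := pvS3 x u c p
    by_cases hmem : p ∈ (pvShift st.1 c).keys
    · rw [if_pos hmem, htot, hold, ← hEprime]
      push_cast at hS3 ⊢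
      omega
    · rw [if_neg hmem, htot]
      have hE' : (pvE x (u ++ [c]) c p : Int) = 0 := by
        rw [hEprime, pvGetD_of_not_mem_keys hmem]
      have hE : pvE x u c p = 0 := by
        by_cases hc : c = 'r'
        · apply pvE_zero_of_N
          have : pvBalc c = 1 := by simp [pvBalc, hc]
          rw [this]
          have h0 : (pvN x u (p - 1) : Int) = 0 := by
            have hng := hnewgetD p
            rw [if_pos (by simp [hc] : (c == 'r') = true)] at hng
            rw [← htot, ← hng, pvGetD_of_not_mem_keys hmem]
          exact_mod_cast h0
        · by_cases hp0 : 0 ≤ p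
          · apply pvE_zero_of_N
            have : pvBalc c = -1 := by simp [pvBalc, hc]
            rw [this]
            have h0 : (pvN x u (p + 1) : Int) = 0 := by
              rw [← htot]
              have := hnewgetD p
              rw [if_neg (by simp [hc]), if_pos hp0] at this
              rw [← this, pvGetD_of_not_mem_keys hmem]
            have : pvN x u (p - -1) = pvN x u (p + 1) := by norm_num
            rw [this]
            exact_mod_cast h0
          · exact pvEW_zero_neg x u c p hc (by omega)
      push_cast at hS3
      omega
  · intro c' p
    show ((st.2.insert c (pvShift st.1 c)).getD c' PySem.Dict.empty).getD p 0 = _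
    by_cases hcc : c' = c
    · subst hcc
      rw [PySem.Dict.getD_insert_self, ← hEprime]
    · rw [PySem.Dict.getD_insert, if_neg hcc, hend, pvS2 x u c c' p hcc]

theorem pvInv2_foldl (x : Int) (cs : List Char) :
    pvInv2 x cs (cs.foldl pvBStep (PySem.Dict.empty.insert x 1, PySem.Dict.empty)) := by
  induction cs using List.reverseRecOn with
  | nil =>
    rw [List.foldl_nil]
    have hk : (PySem.Dict.empty.insert (x : Int) (1 : Int)).keys = [x] := rfl
    refine ⟨by rw [hk]; exact List.nodup_singleton _, ?_, ?_⟩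
    · intro p
      have hK : pvK x [] = [[]] := rfl
      rw [pvN, hK]
      by_cases hp : p = x
      · subst hp
        rw [PySem.Dict.getD_insert_self]
        simp [pvBal]
      · rw [PySem.Dict.getD_insert, if_neg hp, PySem.Dict.getD_empty]
        have : ¬ (x + pvBal [] = p) := by simp [pvBal]; omega
        simp [this]
    · intro c p
      have hK : pvK x [] = [[]] := rfl
      rw [pvE, hK]
      have h1 : ((PySem.Dict.empty : PySem.Dict Char (PySem.Dict Int Int)).getD c
          PySem.Dict.empty).getD p 0 = 0 := by
        rw [PySem.Dict.getD_empty, PySem.Dict.getD_empty]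
      rw [h1]
      simp [pvEndsW]
  | append_singleton u c ih =>
    rw [List.foldl_append, List.foldl_cons, List.foldl_nil]
    exact pvInv2_step x u c _ ih

-- A's answer set characterized
theorem pvA_char (cs : List Char) (x y : Int) (t : List Char) :
    t ∈ pvALoop cs x (pvRsOf cs) (pvLsOf cs) ((pvRsOf cs).length : Int) ((pvLsOf cs).length : Int)
        (if y - x > 0 then y - x else 0) (if y - x > 0 then 0 else -(y - x)) PySem.Set.empty
      ↔ t.Sublist cs ∧ pvSimA x t = true ∧ pvBal t = y - x := by
  rw [pvMem_pvALoop]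
  have hne : t ∉ (PySem.Set.empty : PySem.Set (List Char)) := by simp [PySem.Set.empty]
  set needR0 : Int := if y - x > 0 then y - x else 0 with hR0
  set needL0 : Int := if y - x > 0 then 0 else -(y - x) with hL0
  have hR0n : 0 ≤ needR0 := by rw [hR0]; split_ifs <;> omega
  have hL0n : 0 ≤ needL0 := by rw [hL0]; split_ifs <;> omega
  have hdiff : needR0 - needL0 = y - x := by rw [hR0, hL0]; split_ifs <;> omega
  constructor
  · rintro (habs | ⟨k, h1, h2, r, l, hr, hrl, hl, hll, hsim, hmk⟩)
    · exact absurd habs hne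
    · have hsub : t.Sublist cs := (pvL2 cs t).mp ⟨r, l, hr, hl, hmk⟩
      obtain ⟨hc1, hc2⟩ := pvL1 cs r l t hr hl hmk
      rw [hmk] at hsim
      refine ⟨hsub, hsim, ?_⟩
      rw [pvBal_eq_counts]
      have e1 : (r.length : Int) = needR0 + k := by omega
      have e2 : (l.length : Int) = needL0 + k := by omega
      have : (t.count 'r' : Int) = r.length := by exact_mod_cast hc1
      have : (t.length : Int) = (r.length : Int) + l.length := by exact_mod_cast hc2
      omega
  · rintro ⟨hsub, hsim, hbal⟩
    obtain ⟨r, l, hr, hl, hmk⟩ := (pvL2 cs t).mpr hsub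
    obtain ⟨hc1, hc2⟩ := pvL1 cs r l t hr hl hmk
    rw [pvBal_eq_counts] at hbal
    have hcr : (t.count 'r' : Int) = r.length := by exact_mod_cast hc1
    have hct : (t.length : Int) = (r.length : Int) + l.length := by exact_mod_cast hc2
    have hrlen : r.length ≤ (pvRsOf cs).length := hr.length_le
    have hllen : l.length ≤ (pvLsOf cs).length := hl.length_le
    have hk : needR0.toNat ≤ r.length := by omega
    refine Or.inr ⟨r.length - needR0.toNat, ?_, ?_, r, l, hr, ?_, hl, ?_, by rw [hmk]; exact hsim, hmk⟩
    · omega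
    · omega
    · omega
    · omega

-- ===== VERDICT (by name: the statement is the Claim_ definition above) =====
theorem distinctMoves_spec : Claim_equal_distinctMoves := by
  unfold Claim_equal_distinctMoves Spec_distinctMoves
  intro s n x y _
  unfold distinctMoves distinctMoves_alt
  simp only [pvEnumFold (PySem.List.enumerate s.toList 0) ([], []), List.nil_append]
  set cs := s.toList with hcs
  have hrsd : ((PySem.List.enumerate cs 0).filter (fun e => e.2 == 'r')).map (·.1) = pvRsOf cs := rfl
  have hlsd : ((PySem.List.enumerate cs 0).filter (fun e => !(e.2 == 'r'))).map (·.1) = pvLsOf cs := rfl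
  rw [hrsd, hlsd]
  have hA : ((pvALoop cs x (pvRsOf cs) (pvLsOf cs) ((pvRsOf cs).length : Int)
      ((pvLsOf cs).length : Int) (if y - x > 0 then y - x else 0)
      (if y - x > 0 then 0 else -(y - x)) PySem.Set.empty).length : Int)
      = (pvN x cs y : Int) := by
    have hnodA := pvNodup_pvALoop cs x (pvRsOf cs) (pvLsOf cs) ((pvRsOf cs).length : Int)
      ((pvLsOf cs).length : Int) (if y - x > 0 then y - x else 0)
      (if y - x > 0 then 0 else -(y - x)) PySem.Set.empty List.nodup_nil
    have hperm : (pvALoop cs x (pvRsOf cs) (pvLsOf cs) ((pvRsOf cs).length : Int)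
        ((pvLsOf cs).length : Int) (if y - x > 0 then y - x else 0)
        (if y - x > 0 then 0 else -(y - x)) PySem.Set.empty).Perm
        ((pvK x cs).filter (fun t => decide (x + pvBal t = y))) := by
      rw [List.perm_ext_iff_of_nodup hnodA ((pvK_nodup x cs).filter _)]
      intro t
      rw [List.mem_filter, pvK_mem, pvA_char]
      constructor
      · rintro ⟨h1, h2, h3⟩
        exact ⟨⟨h1, h2⟩, by simp only [decide_eq_true_eq]; omega⟩
      · rintro ⟨⟨h1, h2⟩, h3⟩
        simp only [decide_eq_true_eq] at h3
        exact ⟨h1, h2, by omega⟩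
    rw [hperm.length_eq, ← List.countP_eq_length_filter]
    rfl
  rw [hA]
  rw [PySem.List.foldl_beq_add_one]
  split_ifs with hex
  · have h0 : pvN x cs y = 0 := by
      rw [pvN, List.countP_eq_zero]
      intro t ht hf
      rw [pvK_mem] at ht
      simp only [decide_eq_true_eq] at hf
      have h1 : t.count 'r' ≤ cs.count 'r' := ht.1.count_le 'r'
      have h2 : t.countP (fun a => decide (¬(a == 'r') = true))
          ≤ cs.countP (fun a => decide (¬(a == 'r') = true)) := ht.1.countP_le
      have h3 := List.length_eq_countP_add_countP (p := fun ch : Char => ch == 'r') (l := t)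
      have h4 := List.length_eq_countP_add_countP (p := fun ch : Char => ch == 'r') (l := cs)
      have h5 : t.count 'r' = t.countP (fun ch => ch == 'r') := List.count_eq_countP (a := 'r') (l := t)
      have h6 : cs.count 'r' = cs.countP (fun ch => ch == 'r') := List.count_eq_countP (a := 'r') (l := cs)
      have hb := pvBal_eq_counts t
      have hlen : (PySem.Str.len s : Int) = (cs.length : Int) := by simp [hcs]
      rw [hlen] at hex
      omega
    rw [h0]
    rfl
  · obtain ⟨_, htot, _⟩ := pvInv2_foldl x cs
    rw [← htot y]
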